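-- pv_equiv track=rewrite | github.com/consecrated-hammer/everday | backend/app/modules/tasks/services.py | _SerializeWeekdays
-- ===== SOURCE A (Python) =====
-- from typing import Iterable
--
-- def _SerializeWeekdays(values: Iterable[int] | None) -> str | None:
--     if not values:
--         return None
--     cleaned = []
--     for value in values:
--         try:
--             number = int(value)
--         except (TypeError, ValueError):
--             continue
--         if 0 <= number <= 6:
--             cleaned.append(number)
--     if not cleaned:
--         return None
--     return ",".join(str(value) for value in sorted(set(cleaned)))
-- ===== SOURCE B (Python) =====
-- def _has_day(vals, day):
--     for value in vals:
--         try: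
--             if int(value) == day:
--                 return True
--         except (TypeError, ValueError):
--             continue
--     return False
--
--
-- def _SerializeWeekdays(values):
--     if not values:
--         return None
--     vals = list(values)
--     parts = [str(day) for day in range(7) if _has_day(vals, day)]
--     if not parts:
--         return None
--     return ",".join(parts)
-- ===== Notes on version B (the rewrite author's own statement) =====
-- stated objective: alternative
-- what changed: Instead of collecting valid values and then deduplicating and sorting them (sorted(set(...))), B iterates over the fixed weekday domain 0..6 in ascending order and probes the input once per weekday for a matching element, so no intermediate collection, no set and no sort exist.
import Mathlib
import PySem

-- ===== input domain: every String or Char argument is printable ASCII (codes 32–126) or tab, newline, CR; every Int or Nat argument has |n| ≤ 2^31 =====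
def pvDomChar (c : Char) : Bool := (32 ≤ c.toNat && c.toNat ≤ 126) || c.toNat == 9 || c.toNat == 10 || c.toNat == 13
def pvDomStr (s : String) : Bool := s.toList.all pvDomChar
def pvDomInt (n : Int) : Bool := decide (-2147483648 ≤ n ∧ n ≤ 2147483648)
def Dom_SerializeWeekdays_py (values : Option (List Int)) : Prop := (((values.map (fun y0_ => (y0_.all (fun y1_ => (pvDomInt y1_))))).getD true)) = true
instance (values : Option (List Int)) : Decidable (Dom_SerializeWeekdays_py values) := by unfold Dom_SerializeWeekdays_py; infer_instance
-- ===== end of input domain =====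

-- B drops A's collect/dedup/sort pipeline and instead probes the input once for each
-- weekday 0..6 in ascending order (alternative decomposition, no set and no sort).

-- ===== PORT A =====
-- int(value) on an Int is the identity and never raises, so the try/except is the identity here
def SerializeWeekdays_py (values : Option (List Int)) : Option String :=
  match values with
  | none => none
  | some vs =>
    if vs = [] then none
    else
      let cleaned := vs.foldl (fun acc value => if 0 ≤ value ∧ value ≤ 6 then acc ++ [value] else acc) []
      if cleaned = [] then none
      else some (PySem.Str.join "," ((PySem.List.sorted (PySem.Set.ofList cleaned) (fun x => x) false).map PySem.Int.toStr))

-- ===== PORT B =====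
-- _has_day: a scan over vals with early return on the first match (= List.any);
-- int(value) on an Int is the identity and never raises, so the try/except is the identity here
def hasDay (vals : List Int) (day : Int) : Bool :=
  vals.any (fun value => value == day)

def SerializeWeekdays_py_alt (values : Option (List Int)) : Option String :=
  match values with
  | none => none
  | some vs =>
    if vs = [] then none
    else
      let parts := ((PySem.List.pyRange 0 7 1).filter (fun day => hasDay vs day)).map PySem.Int.toStr
      if parts = [] then none
      else some (PySem.Str.join "," parts)

-- ===== PRECONDITION & SPEC =====
def Spec_SerializeWeekdays_py (values : Option (List Int)) (out : Option String) : Prop := out = SerializeWeekdays_py_alt values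
instance (values : Option (List Int)) (out : Option String) : Decidable (Spec_SerializeWeekdays_py values out) := by unfold Spec_SerializeWeekdays_py; infer_instance

-- ===== CLAIM (what is proved, stated in full; the proofs are below) =====
def Claim_equal_SerializeWeekdays_py : Prop := ∀ (values : Option (List Int)), Dom_SerializeWeekdays_py values → Spec_SerializeWeekdays_py values (SerializeWeekdays_py values)

-- ===== LEMMAS AND PROOFS =====

def pvStepA (acc : List Int) (v : Int) : List Int := if 0 ≤ v ∧ v ≤ 6 then acc ++ [v] else acc

-- membership characterisation of A's accumulated list
lemma pv_mem_foldl (vs : List Int) : ∀ (cs : List Int) (x : Int),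
    x ∈ vs.foldl pvStepA cs ↔ x ∈ cs ∨ (x ∈ vs ∧ 0 ≤ x ∧ x ≤ 6) := by
  induction vs with
  | nil => intro cs x; simp
  | cons v vs ih =>
    intro cs x
    by_cases hv : 0 ≤ v ∧ v ≤ 6
    · rw [List.foldl_cons, show pvStepA cs v = cs ++ [v] from if_pos hv, ih]
      simp only [List.mem_append, List.mem_cons, List.not_mem_nil, or_false]
      constructor
      · rintro ((h | h) | h)
        · exact Or.inl h
        · subst h; exact Or.inr ⟨Or.inl rfl, hv⟩
        · exact Or.inr ⟨Or.inr h.1, h.2⟩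
      · rintro (h | ⟨(h | h), hb⟩)
        · exact Or.inl (Or.inl h)
        · subst h; exact Or.inl (Or.inr rfl)
        · exact Or.inr ⟨h, hb⟩
    · rw [List.foldl_cons, show pvStepA cs v = cs from if_neg hv, ih]
      simp only [List.mem_cons]
      constructor
      · rintro (h | h)
        · exact Or.inl h
        · exact Or.inr ⟨Or.inr h.1, h.2⟩
      · rintro (h | ⟨(h | h), hb⟩)
        · exact Or.inl h
        · subst h; exact absurd hb hv
        · exact Or.inr ⟨h, hb⟩

-- ===== VERDICT (by name: the statement is the Claim_ definition above) =====
theorem SerializeWeekdays_py_spec : Claim_equal_SerializeWeekdays_py := by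
  intro values _
  unfold Spec_SerializeWeekdays_py SerializeWeekdays_py SerializeWeekdays_py_alt
  match values with
  | none => rfl
  | some vs =>
    by_cases hvs : vs = []
    · simp [hvs]
    · simp only [hvs, if_neg, not_false_iff]
      set cleaned := vs.foldl (fun acc value => if 0 ≤ value ∧ value ≤ 6 then acc ++ [value] else acc) [] with hcl
      have hclA : vs.foldl pvStepA [] = cleaned := rfl
      have hmem : ∀ x : Int, x ∈ cleaned ↔ x ∈ vs ∧ 0 ≤ x ∧ x ≤ 6 := by
        intro x
        rw [← hclA, pv_mem_foldl]
        simp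
      -- the two filter predicates agree on the range 0..6
      have hfe : (PySem.List.pyRange 0 7 1).filter (fun day => hasDay vs day)
               = (PySem.List.pyRange 0 7 1).filter (fun d => decide (d ∈ cleaned)) := by
        apply List.filter_congr
        intro d hd
        have hdr := PySem.List.mem_pyRange_one.mp hd
        simp only [hasDay]
        rw [Bool.eq_iff_iff]
        simp only [List.any_eq_true, beq_iff_eq, decide_eq_true_eq, hmem]
        constructor
        · rintro ⟨v, hv, rfl⟩; exact ⟨hv, hdr.1, by omega⟩
        · rintro ⟨hv, _⟩; exact ⟨d, hv, rfl⟩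
      have hsort : PySem.List.sorted (PySem.Set.ofList cleaned) (fun x => x) false
                 = (PySem.List.pyRange 0 7 1).filter (fun d => decide (d ∈ cleaned)) := by
        apply PySem.List.sorted_eq_of_perm_of_pairwise_lt
        · apply (List.perm_ext_iff_of_nodup ((PySem.List.nodup_pyRange_one 0 7).filter _)
            (PySem.Set.nodup_ofList cleaned)).mpr
          intro x
          simp only [List.mem_filter, PySem.List.mem_pyRange_one, PySem.Set.mem_ofList,
            decide_eq_true_eq]
          constructor
          · rintro ⟨_, hx⟩; exact hx
          · intro hx
            have hb := (hmem x).mp hx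
            exact ⟨⟨hb.2.1, by omega⟩, hx⟩
        · exact (PySem.List.pairwise_lt_pyRange_one 0 7).filter _
      have hempty : cleaned = [] ↔
          ((PySem.List.pyRange 0 7 1).filter (fun day => hasDay vs day)).map PySem.Int.toStr = [] := by
        rw [hfe, List.map_eq_nil_iff, ← hsort, List.eq_nil_iff_forall_not_mem,
          List.eq_nil_iff_forall_not_mem]
        constructor
        · intro h x hx
          rw [hsort] at hx
          rcases List.mem_filter.mp hx with ⟨_, hx'⟩
          exact h x (of_decide_eq_true hx')
        · intro h x hx
          have hb := (hmem x).mp hx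
          refine h x ?_
          rw [hsort]
          exact List.mem_filter.mpr ⟨PySem.List.mem_pyRange_one.mpr ⟨hb.2.1, by omega⟩,
            decide_eq_true hx⟩
      by_cases hce : cleaned = []
      · simp [hce, hempty.mp hce]
      · have hne : ((PySem.List.pyRange 0 7 1).filter (fun day => hasDay vs day)).map PySem.Int.toStr ≠ [] :=
          fun h => hce (hempty.mpr h)
        simp only [hce, hne, if_neg, not_false_iff]
        rw [hfe, hsort]
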